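-- pv_equiv track=rewrite | github.com/sukantsondhi/Lets-find-the-rows-Required | HowManyRows.py | solution
-- ===== SOURCE A (Python) =====
-- def solution(A):
--
--     tallestStudent = A[1]
--     length = len(A)
--     rows = 0
--
--
--     for height in range(1, length - 1):
--
--         if (A[height] > tallestStudent):
--             tallestStudent = A[height]
--             rows += 1
--
--         else:
--             pass
--
--     return rows
-- ===== SOURCE B (Python) =====
-- def solution(A):
--     # prefix-max table over the slice A[1:len(A)-1], then count strict rises
--     sub = A[1:len(A) - 1]
--     runmax = []
--     cur = None
--     for h in sub:
--         cur = h if cur is None else max(cur, h)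
--         runmax.append(cur)
--     return sum(1 for prev, nxt in zip(runmax, runmax[1:]) if nxt > prev)
-- ===== Notes on version B (the rewrite author's own statement) =====
-- stated objective: alternative
-- what changed: Replaces the single scalar-running-max index loop by two differently-shaped passes: build an explicit prefix-max table of the slice A[1:len(A)-1], then count strict rises between adjacent table entries via zip.
import Mathlib
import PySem

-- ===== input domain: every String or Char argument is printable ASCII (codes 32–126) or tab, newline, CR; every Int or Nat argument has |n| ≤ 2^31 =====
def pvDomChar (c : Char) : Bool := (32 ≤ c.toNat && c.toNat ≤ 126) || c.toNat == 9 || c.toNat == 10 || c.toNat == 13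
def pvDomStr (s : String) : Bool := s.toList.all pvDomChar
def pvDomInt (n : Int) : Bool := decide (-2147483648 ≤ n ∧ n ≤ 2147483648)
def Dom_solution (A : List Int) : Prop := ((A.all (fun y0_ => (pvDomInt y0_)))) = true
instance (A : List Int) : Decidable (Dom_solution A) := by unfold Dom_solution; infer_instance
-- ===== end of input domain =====

-- B replaces A's single scalar-running-max index loop by an explicit prefix-max table of the
-- slice followed by a separate zip pass counting strict rises (alternative decomposition;
-- same cost). Equivalence of the RETURN value is proved on lists of length ≥ 2 (A raises
-- IndexError below that).

-- ===== PORT A =====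
def solution (A : List Int) : Int :=
  -- A[1] raises IndexError when len(A) < 2; those inputs are outside Pre_solution
  let tallestStudent : Int := (PySem.List.pyGet? A 1).getD 0
  let length : Int := (A.length : Int)
  let rows : Int := 0
  let st :=
    (PySem.List.pyRange 1 (length - 1) 1).foldl
      (fun (st : Int × Int) height =>
        if PySem.List.pyGetD A height 0 > st.1 then
          (PySem.List.pyGetD A height 0, st.2 + 1)
        else st)
      (tallestStudent, rows)
  st.2

-- ===== PORT B =====
-- the 'for h in sub' loop of Source B: carries (cur, runmax) and appends the running max
def buildRunmax : Option Int → List Int → List Int → List Int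
  | _, runmax, [] => runmax
  | cur, runmax, h :: t =>
      let c : Int := match cur with | none => h | some c0 => max c0 h
      buildRunmax (some c) (runmax ++ [c]) t

def solution_alt (A : List Int) : Int :=
  let sub := PySem.List.slice A (some 1) (some ((A.length : Int) - 1))
  let runmax := buildRunmax none [] sub
  (runmax.zip (PySem.List.slice runmax (some 1) none)).foldl
    (fun s p => s + (if p.2 > p.1 then 1 else 0)) 0

-- ===== PRECONDITION & SPEC =====
-- Pre_: A[1] must exist — A raises IndexError on lists of length < 2
def Pre_solution (A : List Int) : Prop := 2 ≤ A.length
instance (A : List Int) : Decidable (Pre_solution A) := by unfold Pre_solution; infer_instance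
def pvWitness_solution : List Int := [3, 1, 4, 1, 5]

def Spec_solution (A : List Int) (out : Int) : Prop := out = solution_alt A
instance (A : List Int) (out : Int) : Decidable (Spec_solution A out) := by unfold Spec_solution; infer_instance

-- ===== CLAIM (what is proved, stated in full; the proofs are below) =====
def Claim_equal_solution : Prop := ∀ (A : List Int), Dom_solution A → Pre_solution A → Spec_solution A (solution A)

-- ===== LEMMAS AND PROOFS =====

-- A's loop, structurally over the visited elements
def loopE (c r : Int) : List Int → Int
  | [] => r
  | h :: t => if h > c then loopE h (r + 1) t else loopE c r t

-- the tail of the prefix-max table seeded with current max c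
def gMax (c : Int) : List Int → List Int
  | [] => []
  | h :: t => max c h :: gMax (max c h) t

-- number of strict rises between adjacent elements
def rises : List Int → Int
  | a :: b :: t => (if b > a then 1 else 0) + rises (b :: t)
  | _ => 0

theorem foldl_eq_loopE (xs : List Int) (c r : Int) :
    (xs.foldl (fun (st : Int × Int) h => if h > st.1 then (h, st.2 + 1) else st) (c, r)).2
      = loopE c r xs := by
  induction xs generalizing c r with
  | nil => rfl
  | cons h t ih =>
      simp only [List.foldl, loopE]
      by_cases hc : h > c
      · simp [hc, ih]
      · simp [hc, ih]

theorem buildRunmax_eq (t : List Int) (c : Int) (acc : List Int) :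
    buildRunmax (some c) acc t = acc ++ gMax c t := by
  induction t generalizing c acc with
  | nil => simp [buildRunmax, gMax]
  | cons h t ih => simp [buildRunmax, gMax, ih]

theorem zipfold_eq_rises (l : List Int) (s : Int) :
    (l.zip l.tail).foldl (fun s p => s + (if p.2 > p.1 then 1 else 0)) s = s + rises l := by
  induction l generalizing s with
  | nil => simp [rises]
  | cons a t ih =>
      cases t with
      | nil => simp [rises]
      | cons b t' =>
          simp only [List.tail_cons] at ih
          simp only [List.tail_cons, List.zip_cons_cons, List.foldl]
          rw [ih]
          simp only [rises]
          split_ifs with hba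
          all_goals linarith

theorem loopE_eq_rises (t : List Int) (c r : Int) :
    loopE c r t = r + rises (c :: gMax c t) := by
  induction t generalizing c r with
  | nil => simp [loopE, gMax, rises]
  | cons h t ih =>
      simp only [loopE, gMax, rises]
      by_cases hc : h > c
      · have hm : max c h = h := by omega
        rw [hm, ih h (r + 1)]
        split_ifs
        all_goals linarith
      · have hm : max c h = c := by omega
        rw [hm, ih c r]
        split_ifs
        all_goals linarith

-- A's value on a ≥2-element list, as loopE over the slice's elements
theorem solution_eq_loopE (a0 a1 : Int) (rest : List Int) :
    solution (a0 :: a1 :: rest) = loopE a1 0 ((a1 :: rest).dropLast) := by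
  unfold solution
  simp only []
  have hlen : ((a0 :: a1 :: rest).length : Int) - 1 = (((a0 :: a1 :: rest).dropLast).length : Int) := by
    simp
  rw [hlen]
  have hget : (PySem.List.pyGet? (a0 :: a1 :: rest) 1).getD 0 = a1 := by
    simp
  rw [hget]
  set A := a0 :: a1 :: rest with hA
  set A' := A.dropLast with hA'
  have hcong :
      (PySem.List.pyRange 1 (A'.length : Int) 1).foldl
        (fun (st : Int × Int) height =>
          if PySem.List.pyGetD A height 0 > st.1 then (PySem.List.pyGetD A height 0, st.2 + 1) else st)
        (a1, 0)
      = (PySem.List.pyRange 1 (A'.length : Int) 1).foldl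
        (fun (st : Int × Int) height =>
          if PySem.List.pyGetD A' height 0 > st.1 then (PySem.List.pyGetD A' height 0, st.2 + 1) else st)
        (a1, 0) := by
    apply PySem.List.foldl_congr_mem
    intro acc x hx
    rw [PySem.List.mem_pyRange_one] at hx
    have h0 : (0:Int) ≤ x := by omega
    have hlenle : A'.length ≤ A.length := by simp [hA']
    have hxltA : x < (A.length : Int) := by omega
    rw [PySem.List.pyGetD_eq_getElem A 0 h0 hxltA,
        PySem.List.pyGetD_eq_getElem A' 0 h0 hx.2]
    have hxlt' : x.toNat < A'.length := by omega
    have he : A'[x.toNat]'hxlt' = A[x.toNat]'(by omega) := by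
      simp [hA', List.getElem_dropLast]
    simp only [he]
  rw [hcong]
  rw [PySem.List.foldl_pyRange_pyGetD' A' 0
        (fun (st : Int × Int) v => if v > st.1 then (v, st.2 + 1) else st) (a1, 0)
        (by norm_num : (0:Int) ≤ 1)]
  rw [foldl_eq_loopE]
  have : A'.drop (1:Int).toNat = (a1 :: rest).dropLast := by
    rw [hA', hA]
    cases rest with
    | nil => simp
    | cons x xs => simp [List.dropLast]
  rw [this]

-- B's value on a ≥2-element list, as rises of the prefix-max table
theorem solution_alt_eq_rises (a0 a1 : Int) (rest : List Int) :
    solution_alt (a0 :: a1 :: rest) = rises (buildRunmax none [] ((a1 :: rest).dropLast)) := by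
  unfold solution_alt
  simp only []
  have hslice : PySem.List.slice (a0 :: a1 :: rest) (some 1) (some (((a0 :: a1 :: rest).length : Int) - 1))
      = (a1 :: rest).dropLast := by
    have h1 : ((a0 :: a1 :: rest).length : Int) - 1 = ((a1 :: rest).length : Nat) := by simp
    rw [h1]
    rw [show ((1:Int) = ((1:Nat) : Int)) from rfl]
    rw [PySem.List.slice_natCast]
    cases rest with
    | nil => simp
    | cons x xs => simp [List.dropLast_eq_take]
  rw [hslice]
  rw [PySem.List.slice_from_one]
  rw [zipfold_eq_rises]
  omega

theorem main_eq (a0 a1 : Int) (rest : List Int) :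
    solution (a0 :: a1 :: rest) = solution_alt (a0 :: a1 :: rest) := by
  rw [solution_eq_loopE, solution_alt_eq_rises]
  cases h : (a1 :: rest).dropLast with
  | nil => simp [loopE, buildRunmax, rises]
  | cons s t =>
      -- the slice is nonempty, so its head is a1
      have hs : s = a1 := by
        cases rest with
        | nil => simp at h
        | cons x xs =>
            simp [List.dropLast] at h
            exact h.1.symm
      subst hs
      show loopE s 0 (s :: t) = rises (buildRunmax none [] (s :: t))
      have hb : buildRunmax none [] (s :: t) = s :: gMax s t := by
        simp [buildRunmax, buildRunmax_eq]
      rw [hb]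
      have : loopE s 0 (s :: t) = loopE s 0 t := by
        simp [loopE]
      rw [this, loopE_eq_rises]
      omega

-- ===== VERDICT (by name: the statement is the Claim_ definition above) =====
theorem solution_spec : Claim_equal_solution := by
  intro A _ hpre
  unfold Spec_solution
  unfold Pre_solution at hpre
  match A, hpre with
  | a0 :: a1 :: rest, _ => exact main_eq a0 a1 rest
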